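-- pv_equiv track=rewrite | github.com/981377660LMT/algorithm-study | 22_专题/计算贡献/All Sublists Sum.py | solve
-- ===== SOURCE A (Python) =====
-- def solve(nums):
--     MOD = 10 ** 9 + 7
--     n = len(nums)
--
--     res = 0
--     for i, num in enumerate(nums):
--         res += (i + 1) * (n - i) * num % MOD
--         res %= MOD
--     return res
-- ===== SOURCE B (Python) =====
-- def solve(nums):
--     MOD = 10 ** 9 + 7
--     n = len(nums)
--     res = 0
--     for l in range(n):
--         s = 0
--         for r in range(l, n):
--             s += nums[r]
--             res = (res + s) % MOD
--     return res
-- ===== Notes on version B (the rewrite author's own statement) =====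
-- stated objective: alternative
-- what changed: B sums every contiguous sublist directly with nested loops over start and end indices (adding a running sum and taking mod each step), instead of A's single pass that weights each element by its closed-form contribution count (i+1)*(n-i).
import Mathlib
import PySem

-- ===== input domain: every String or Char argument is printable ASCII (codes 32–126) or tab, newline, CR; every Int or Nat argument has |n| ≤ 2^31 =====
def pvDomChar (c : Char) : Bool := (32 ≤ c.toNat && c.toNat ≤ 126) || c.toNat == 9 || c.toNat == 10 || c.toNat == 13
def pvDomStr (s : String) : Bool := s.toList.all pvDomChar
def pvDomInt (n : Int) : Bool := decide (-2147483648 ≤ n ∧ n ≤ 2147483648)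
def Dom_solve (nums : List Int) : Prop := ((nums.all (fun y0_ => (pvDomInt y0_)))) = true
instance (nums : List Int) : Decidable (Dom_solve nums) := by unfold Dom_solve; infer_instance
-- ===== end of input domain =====

-- B sums every contiguous sublist directly with nested loops (a different, O(n^2) decomposition)
-- instead of A's single weighted pass; same result mod 1e9+7, not faster.

-- ===== PORT A =====
def solve (nums : List Int) : Int :=
  let MOD : Int := 10 ^ 9 + 7
  let n : Int := (nums.length : Int)
  (PySem.List.enumerate nums 0).foldl
    (fun res p => PySem.Int.mod (res + PySem.Int.mod ((p.1 + 1) * (n - p.1) * p.2) MOD) MOD) 0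

-- ===== PORT B =====
def solve_alt (nums : List Int) : Int :=
  let MOD : Int := 10 ^ 9 + 7
  let n : Int := (nums.length : Int)
  (PySem.List.pyRange 0 n 1).foldl
    (fun res l =>
      ((PySem.List.pyRange l n 1).foldl
        (fun sr r =>
          (sr.1 + PySem.List.pyGetD nums r 0,
           PySem.Int.mod (sr.2 + (sr.1 + PySem.List.pyGetD nums r 0)) MOD)) ((0 : Int), res)).2) 0

-- ===== PRECONDITION & SPEC =====
def Spec_solve (nums : List Int) (out : Int) : Prop := out = solve_alt nums
instance (nums : List Int) (out : Int) : Decidable (Spec_solve nums out) := by unfold Spec_solve; infer_instance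

-- ===== CLAIM (what is proved, stated in full; the proofs are below) =====
def Claim_equal_solve : Prop := ∀ (nums : List Int), Dom_solve nums → Spec_solve nums (solve nums)

-- ===== LEMMAS AND PROOFS =====

-- sum of running sums of ys started at s0 (the values B's inner loop adds to res)
def pvG (s0 : Int) : List Int → Int
  | [] => 0
  | x :: xs => (s0 + x) + pvG (s0 + x) xs

-- total sum of all contiguous sublist sums
def pvT : List Int → Int
  | [] => 0
  | x :: xs => pvG 0 (x :: xs) + pvT xs

-- A's weighted sum, parameterized by the left-count weight p of the first element
def pvV (p : Int) : List Int → Int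
  | [] => 0
  | x :: xs => p * ((xs.length : Int) + 1) * x + pvV (p + 1) xs

theorem pvG_shift (ys : List Int) : ∀ s0 : Int, pvG s0 ys = (ys.length : Int) * s0 + pvG 0 ys := by
  induction ys with
  | nil => intro s0; simp [pvG]
  | cons x xs ih =>
    intro s0
    simp only [pvG, List.length_cons]
    rw [ih (s0 + x), ih (0 + x)]
    push_cast
    ring

theorem pvV_eq (ys : List Int) : ∀ p : Int, pvV p ys = pvT ys + (p - 1) * pvG 0 ys := by
  induction ys with
  | nil => intro p; simp [pvV, pvT, pvG]
  | cons x xs ih =>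
    intro p
    simp only [pvV, pvT]
    rw [ih (p + 1)]
    have h1 : pvG 0 (x :: xs) = ((xs.length : Int) + 1) * x + pvG 0 xs := by
      simp only [pvG]; rw [pvG_shift xs (0 + x)]; ring
    rw [h1]; ring

theorem pv_mod_eq (a : Int) : PySem.Int.mod a (10 ^ 9 + 7) = a % 1000000007 := by
  rw [PySem.Int.mod_eq_emod_of_pos (by norm_num)]; norm_num

-- A's fold over enumerate, generalized over the start index j and the accumulator
theorem pvA_fold (n : Int) (ys : List Int) : ∀ (j res0 : Int), n = j + (ys.length : Int) →
    (PySem.List.enumerate ys j).foldl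
      (fun res p => PySem.Int.mod (res + PySem.Int.mod ((p.1 + 1) * (n - p.1) * p.2) (10 ^ 9 + 7)) (10 ^ 9 + 7)) res0
    = if ys = [] then res0 else (res0 + pvV (j + 1) ys) % 1000000007 := by
  induction ys with
  | nil => intro j res0 _; simp [PySem.List.enumerate_nil]
  | cons x xs ih =>
    intro j res0 hn
    simp only [List.length_cons] at hn
    push_cast at hn
    rw [PySem.List.enumerate_cons, List.foldl_cons]
    rw [ih (j + 1) _ (by omega)]
    have hterm : n - j = (xs.length : Int) + 1 := by omega
    simp only [pvV, List.cons_ne_nil, if_false, pv_mod_eq, hterm]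
    rcases xs with _ | ⟨y, ys'⟩
    · simp only [if_true, pvV, List.length_nil]
      norm_num
    · simp only [List.cons_ne_nil, if_false]
      set t := (j + 1) * ((((y :: ys').length : Nat) : Int) + 1) * x with ht
      set v := pvV (j + 1 + 1) (y :: ys') with hv
      omega

-- B's inner fold over a suffix, generalized over the state (s0, res0)
theorem pvB_inner (ys : List Int) : ∀ (s0 res0 : Int),
    ys.foldl (fun (sr : Int × Int) x =>
        (sr.1 + x, PySem.Int.mod (sr.2 + (sr.1 + x)) (10 ^ 9 + 7))) (s0, res0)
    = (s0 + ys.sum, if ys = [] then res0 else (res0 + pvG s0 ys) % 1000000007) := by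
  induction ys with
  | nil => intro s0 res0; simp
  | cons x xs ih =>
    intro s0 res0
    simp only [List.foldl_cons]
    rw [ih]
    refine Prod.ext ?_ ?_
    · simp; ring
    · simp only [List.cons_ne_nil, if_false, pvG, pv_mod_eq]
      rcases xs with _ | ⟨y, ys'⟩
      · simp [pvG]
      · simp only [List.cons_ne_nil, if_false]
        set g := pvG (s0 + x) (y :: ys') with hg
        omega

-- the inner loop of B, with its range-and-index form rewritten to a fold over the suffix
theorem pvB_body (nums : List Int) (l : Nat) (res0 : Int) :
    ((PySem.List.pyRange (l : Int) ((nums.length : Nat) : Int) 1).foldl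
      (fun (sr : Int × Int) r =>
        (sr.1 + PySem.List.pyGetD nums r 0,
         PySem.Int.mod (sr.2 + (sr.1 + PySem.List.pyGetD nums r 0)) (10 ^ 9 + 7))) ((0 : Int), res0)).2
    = if nums.drop l = [] then res0 else (res0 + pvG 0 (nums.drop l)) % 1000000007 := by
  have h := PySem.List.foldl_pyRange_pyGetD' nums 0
    (fun (sr : Int × Int) x => (sr.1 + x, PySem.Int.mod (sr.2 + (sr.1 + x)) (10 ^ 9 + 7)))
    ((0 : Int), res0) (a := (l : Int)) (by positivity)
  simp only [] at h
  rw [h, Int.toNat_natCast, pvB_inner]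

-- B's outer fold, peeled one range element at a time
theorem pvB_outer (nums : List Int) (m : Nat) : ∀ (k : Nat) (res0 : Int), nums.length = k + m →
    (PySem.List.pyRange (k : Int) ((nums.length : Nat) : Int) 1).foldl
      (fun res l =>
        ((PySem.List.pyRange l ((nums.length : Nat) : Int) 1).foldl
          (fun (sr : Int × Int) r =>
            (sr.1 + PySem.List.pyGetD nums r 0,
             PySem.Int.mod (sr.2 + (sr.1 + PySem.List.pyGetD nums r 0)) (10 ^ 9 + 7))) ((0 : Int), res)).2) res0
    = if nums.drop k = [] then res0 else (res0 + pvT (nums.drop k)) % 1000000007 := by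
  induction m with
  | zero =>
    intro k res0 hk
    rw [PySem.List.pyRange_one_eq_nil (by omega)]
    simp [List.drop_eq_nil_iff, hk]
  | succ m ih =>
    intro k res0 hk
    have hklt : k < nums.length := by omega
    rw [PySem.List.pyRange_one_cons (by exact_mod_cast hklt)]
    simp only [List.foldl_cons]
    have hk1 : ((k : Int) + 1) = ((k + 1 : Nat) : Int) := by push_cast; ring
    rw [pvB_body nums k _, hk1, ih (k + 1) _ (by omega)]
    have hdk := List.drop_eq_getElem_cons hklt
    have hne : nums.drop k ≠ [] := by
      simp only [ne_eq, List.drop_eq_nil_iff]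
      omega
    rw [if_neg hne, if_neg hne]
    have hT : pvT (nums.drop k) = pvG 0 (nums.drop k) + pvT (nums.drop (k + 1)) := by
      rw [hdk]; rfl
    by_cases h2 : nums.drop (k + 1) = []
    · rw [if_pos h2]
      have hz : pvT (nums.drop (k + 1)) = 0 := by rw [h2]; rfl
      rw [hT, hz]
      ring_nf
    · rw [if_neg h2, hT]
      set g := pvG 0 (nums.drop k) with hg
      set t := pvT (nums.drop (k + 1)) with htt
      omega

-- ===== VERDICT (by name: the statement is the Claim_ definition above) =====
theorem solve_spec : Claim_equal_solve := by
  unfold Claim_equal_solve Spec_solve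
  intro nums _
  simp only [solve, solve_alt]
  rw [pvA_fold ((nums.length : Nat) : Int) nums 0 0 (by ring)]
  have hB := pvB_outer nums nums.length 0 0 (by omega)
  simp only [Nat.cast_zero, List.drop_zero] at hB
  rw [hB]
  rcases nums with _ | ⟨x, xs⟩
  · rfl
  · simp only [List.cons_ne_nil, if_false, zero_add]
    rw [pvV_eq]
    ring_nf
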